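-- pv_equiv track=rewrite | github.com/Jonkua/mdna-extractionv2-table-issues | src/parsers/text_normalizer.py | _remove_empty_lines
-- ===== SOURCE A (Python) =====
-- def _remove_empty_lines(text: str) -> str:
--     """Remove excessive empty lines while preserving paragraph structure."""
--     lines = text.split('\n')
--     non_empty_lines = []
--
--     for line in lines:
--         if line.strip():
--             non_empty_lines.append(line)
--         elif non_empty_lines and non_empty_lines[-1].strip():
--             # Keep one empty line between paragraphs
--             non_empty_lines.append('')
--
--     return '\n'.join(non_empty_lines)
-- ===== SOURCE B (Python) =====
-- def _remove_empty_lines(text: str) -> str: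
--     """Remove excessive empty lines while preserving paragraph structure."""
--     lines = text.split('\n')
--     result = []
--     while lines:
--         if lines[0].strip():
--             # consume a run of content lines verbatim
--             k = 0
--             while k < len(lines) and lines[k].strip():
--                 k += 1
--             result.extend(lines[:k])
--             lines = lines[k:]
--         else:
--             # consume a whole run of blank lines; keep at most one separator
--             k = 0
--             while k < len(lines) and not lines[k].strip():
--                 k += 1
--             if result:
--                 result.append('')
--             lines = lines[k:]
--     return '\n'.join(result)
-- ===== Notes on version B (the rewrite author's own statement) =====
-- stated objective: alternative
-- what changed: B processes the lines run by run (consume a maximal run of content lines verbatim, collapse a maximal run of blank lines into at most one separator guarded by the output being non-empty), instead of A's line-at-a-time loop that inspects the last kept line's strip() to decide whether to emit a separator.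
import Mathlib
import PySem

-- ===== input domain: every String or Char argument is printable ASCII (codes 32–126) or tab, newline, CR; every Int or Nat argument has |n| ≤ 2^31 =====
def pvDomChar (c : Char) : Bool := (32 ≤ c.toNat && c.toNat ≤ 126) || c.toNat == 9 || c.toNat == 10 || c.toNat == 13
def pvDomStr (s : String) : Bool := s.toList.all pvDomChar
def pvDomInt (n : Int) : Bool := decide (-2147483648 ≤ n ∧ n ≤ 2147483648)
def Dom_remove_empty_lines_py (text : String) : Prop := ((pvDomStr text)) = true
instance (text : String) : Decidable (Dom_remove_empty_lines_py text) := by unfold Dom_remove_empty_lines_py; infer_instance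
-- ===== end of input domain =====

-- B collapses blank-line runs in one run-by-run pass instead of A's line-at-a-time
-- loop that re-inspects the last kept line; same behaviour, alternative decomposition.

-- ===== PORT A =====
-- loop body of A: append content lines; on a blank line, append '' only when the
-- list is non-empty and its last element strips non-empty ('lines[-1]' guarded by
-- the list being truthy is exactly getLast?).  Lines are List Char.
def aStep (acc : List (List Char)) (line : List Char) : List (List Char) :=
  if PySem.Chars.strip line ≠ [] then acc ++ [line]
  else
    match acc.getLast? with
    | some last => if PySem.Chars.strip last ≠ [] then acc ++ [[]] else acc
    | none => acc

def remove_empty_lines_py (text : String) : String :=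
  let lines := PySem.Chars.splitOn text.toList ['\n']
  String.ofList (PySem.Chars.join ['\n'] (lines.foldl aStep []))

-- ===== PORT B =====
def bIsContent (l : List Char) : Bool := !(PySem.Chars.strip l).isEmpty

-- run-by-run loop of B: `lines[:k]` / `lines[k:]` of the inner while scans are
-- takeWhile / dropWhile on the run's predicate.
def bGo (acc : List (List Char)) (lines : List (List Char)) : List (List Char) :=
  match lines with
  | [] => acc
  | l :: rest =>
    if hc : bIsContent l then
      bGo (acc ++ (l :: rest).takeWhile bIsContent) ((l :: rest).dropWhile bIsContent)
    else
      bGo (if acc.isEmpty then acc else acc ++ [[]])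
          ((l :: rest).dropWhile (fun x => !bIsContent x))
termination_by lines.length
decreasing_by
  · simp only [List.dropWhile_cons, hc, if_true]
    exact Nat.lt_succ_of_le (List.Sublist.length_le (List.dropWhile_sublist _))
  · simp only [List.dropWhile_cons, hc, Bool.not_false, if_true]
    exact Nat.lt_succ_of_le (List.Sublist.length_le (List.dropWhile_sublist _))

def remove_empty_lines_py_alt (text : String) : String :=
  String.ofList (PySem.Chars.join ['\n'] (bGo [] (PySem.Chars.splitOn text.toList ['\n'])))

-- ===== PRECONDITION & SPEC =====
def Spec_remove_empty_lines_py (text : String) (out : String) : Prop := out = remove_empty_lines_py_alt text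
instance (text : String) (out : String) : Decidable (Spec_remove_empty_lines_py text out) := by unfold Spec_remove_empty_lines_py; infer_instance

-- ===== CLAIM (what is proved, stated in full; the proofs are below) =====
def Claim_equal_remove_empty_lines_py : Prop := ∀ (text : String), Dom_remove_empty_lines_py text → Spec_remove_empty_lines_py text (remove_empty_lines_py text)

-- ===== LEMMAS AND PROOFS =====

-- last kept line strips non-empty (A's separator guard), as a Bool on the accumulator
def contentLast (acc : List (List Char)) : Bool :=
  match acc.getLast? with
  | some l => bIsContent l
  | none => false

lemma bIsContent_iff (l : List Char) : bIsContent l = true ↔ PySem.Chars.strip l ≠ [] := by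
  simp [bIsContent]

lemma bIsContent_false_iff (l : List Char) : bIsContent l = false ↔ PySem.Chars.strip l = [] := by
  simp [bIsContent]

lemma aStep_content (acc : List (List Char)) (l : List Char) (h : bIsContent l = true) :
    aStep acc l = acc ++ [l] := by
  rw [bIsContent_iff] at h
  simp [aStep, h]

lemma aStep_blank_nil (l : List Char) (h : bIsContent l = false) :
    aStep [] l = [] := by
  rw [bIsContent_false_iff] at h
  simp [aStep, h]

lemma aStep_blank_contentLast (acc : List (List Char)) (l : List Char)
    (h : bIsContent l = false) (hl : contentLast acc = true) :
    aStep acc l = acc ++ [[]] := by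
  rw [bIsContent_false_iff] at h
  unfold contentLast at hl
  unfold aStep
  cases hg : acc.getLast? with
  | none => simp [hg] at hl
  | some last =>
    rw [hg] at hl
    rw [bIsContent_iff] at hl
    simp [h, hl]

lemma aStep_blank_blankLast (acc : List (List Char)) (l : List Char)
    (h : bIsContent l = false) (hl : contentLast acc = false) (hne : acc ≠ []) :
    aStep acc l = acc := by
  rw [bIsContent_false_iff] at h
  unfold contentLast at hl
  unfold aStep
  cases hg : acc.getLast? with
  | none => exact absurd (List.getLast?_eq_none_iff.mp hg) hne
  | some last =>
    rw [hg] at hl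
    rw [bIsContent_false_iff] at hl
    simp [h, hl]

-- a run of content lines is appended verbatim
lemma foldl_content_run (run : List (List Char)) :
    ∀ acc, (∀ l ∈ run, bIsContent l = true) → run.foldl aStep acc = acc ++ run := by
  induction run with
  | nil => intro acc _; simp
  | cons l t ih =>
    intro acc h
    have hl := h l (by simp)
    simp only [List.foldl_cons, aStep_content acc l hl]
    rw [ih (acc ++ [l]) (fun x hx => h x (by simp [hx]))]
    simp

-- a run of blank lines leaves an empty accumulator empty
lemma foldl_blank_run_nil (run : List (List Char))
    (h : ∀ l ∈ run, bIsContent l = false) : run.foldl aStep [] = [] := by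
  induction run with
  | nil => simp
  | cons l t ih =>
    simp only [List.foldl_cons, aStep_blank_nil l (h l (by simp))]
    exact ih (fun x hx => h x (by simp [hx]))

-- once the last kept line is blank, further blank lines are all skipped
lemma foldl_blank_run_blankLast (run : List (List Char)) :
    ∀ acc, (∀ l ∈ run, bIsContent l = false) → contentLast acc = false → acc ≠ [] →
      run.foldl aStep acc = acc := by
  induction run with
  | nil => intro acc _ _ _; simp
  | cons l t ih =>
    intro acc h hl hne
    simp only [List.foldl_cons, aStep_blank_blankLast acc l (h l (by simp)) hl hne]
    exact ih acc (fun x hx => h x (by simp [hx])) hl hne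

lemma contentLast_append_content (acc : List (List Char)) (l : List Char) (t : List (List Char))
    (h : ∀ x ∈ l :: t, bIsContent x = true) :
    contentLast (acc ++ l :: t) = true := by
  have hne : l :: t ≠ ([] : List (List Char)) := by simp
  unfold contentLast
  rw [List.getLast?_append_of_ne_nil _ hne,
    (List.getLast?_eq_some_getLast hne : (l :: t).getLast? = some ((l :: t).getLast hne))]
  exact h _ (List.getLast_mem hne)

lemma contentLast_append_sep (acc : List (List Char)) :
    contentLast (acc ++ [[]]) = false := by
  unfold contentLast
  rw [List.getLast?_append_of_ne_nil _ (by simp : [[]] ≠ ([] : List (List Char)))]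
  decide

-- the head of what dropWhile(!content) leaves, if any, is a content line
lemma head_dropWhile_content (lines : List (List Char)) :
    (lines.dropWhile (fun x => !bIsContent x)) = [] ∨
      ∃ l t, (lines.dropWhile (fun x => !bIsContent x)) = l :: t ∧ bIsContent l = true := by
  induction lines with
  | nil => left; rfl
  | cons l t ih =>
    by_cases hc : bIsContent l = true
    · right; exact ⟨l, t, by simp [hc], hc⟩
    · simp only [Bool.not_eq_true] at hc
      simpa [List.dropWhile_cons, hc] using ih

-- main equivalence of the two loops
lemma main_loop : ∀ n (lines : List (List Char)), lines.length ≤ n → ∀ acc,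
    (acc = [] ∨ contentLast acc = true ∨
      lines = [] ∨ ∃ l t, lines = l :: t ∧ bIsContent l = true) →
    lines.foldl aStep acc = bGo acc lines := by
  intro n
  induction n with
  | zero =>
    intro lines hlen acc _
    have : lines = [] := List.length_eq_zero_iff.mp (Nat.le_zero.mp hlen)
    subst this; simp [bGo]
  | succ n ih =>
    intro lines hlen acc hacc
    cases lines with
    | nil => simp [bGo]
    | cons l rest =>
      have hlen' : rest.length + 1 ≤ n + 1 := by simpa using hlen
      by_cases hc : bIsContent l = true
      · -- content run
        set run := (l :: rest).takeWhile bIsContent with hrun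
        set rest' := (l :: rest).dropWhile bIsContent with hrest
        have hsplit : l :: rest = run ++ rest' := (List.takeWhile_append_dropWhile).symm
        have hrunc : ∀ x ∈ run, bIsContent x = true := fun x hx => List.mem_takeWhile_imp hx
        have hruneq : run = l :: rest.takeWhile bIsContent := by
          simp [hrun, hc]
        have hresteq : rest' = rest.dropWhile bIsContent := by
          simp [hrest, hc]
        have hlt : rest'.length ≤ n := by
          have := (List.dropWhile_sublist (p := bIsContent) (l := rest)).length_le
          rw [hresteq]; omega
        have hbgo : bGo acc (l :: rest) = bGo (acc ++ run) rest' := by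
          rw [bGo]
          simp only [hc, dite_true, ← hrun, ← hrest]
        calc (l :: rest).foldl aStep acc
            = (run ++ rest').foldl aStep acc := by rw [← hsplit]
          _ = rest'.foldl aStep (run.foldl aStep acc) := List.foldl_append
          _ = rest'.foldl aStep (acc ++ run) := by rw [foldl_content_run run acc hrunc]
          _ = bGo (acc ++ run) rest' := by
                refine ih rest' hlt (acc ++ run) (Or.inr (Or.inl ?_))
                rw [hruneq]
                exact contentLast_append_content acc l _ (by rw [← hruneq]; exact hrunc)
          _ = bGo acc (l :: rest) := hbgo.symm
      · -- blank run
        simp only [Bool.not_eq_true] at hc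
        set run := (l :: rest).takeWhile (fun x => !bIsContent x) with hrun
        set rest' := (l :: rest).dropWhile (fun x => !bIsContent x) with hrest
        have hsplit : l :: rest = run ++ rest' := (List.takeWhile_append_dropWhile).symm
        have hrunb : ∀ x ∈ run, bIsContent x = false := by
          intro x hx
          have := List.mem_takeWhile_imp hx
          simpa using this
        have hruneq : run = l :: rest.takeWhile (fun x => !bIsContent x) := by
          simp [hrun, hc]
        have hresteq : rest' = rest.dropWhile (fun x => !bIsContent x) := by
          simp [hrest, hc]
        have hlt : rest'.length ≤ n := by
          have := (List.dropWhile_sublist (p := fun x => !bIsContent x) (l := rest)).length_le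
          rw [hresteq]; omega
        have hrest'ok : rest' = [] ∨ ∃ l' t', rest' = l' :: t' ∧ bIsContent l' = true :=
          head_dropWhile_content (l :: rest)
        have hbgo : bGo acc (l :: rest) =
            bGo (if acc.isEmpty then acc else acc ++ [[]]) rest' := by
          rw [bGo]
          simp only [hc, Bool.false_eq_true, dite_false, ← hrest]
        rcases hacc with hnil | hcl | habs | ⟨l', t', heq, hcl'⟩
        · -- acc = []
          subst hnil
          calc (l :: rest).foldl aStep ([] : List (List Char))
              = (run ++ rest').foldl aStep [] := by rw [← hsplit]
            _ = rest'.foldl aStep (run.foldl aStep []) := List.foldl_append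
            _ = rest'.foldl aStep [] := by rw [foldl_blank_run_nil run hrunb]
            _ = bGo [] rest' := ih rest' hlt [] (Or.inl rfl)
            _ = bGo [] (l :: rest) := by rw [hbgo]; simp
        · -- contentLast acc = true; acc ≠ []
          have hne : acc ≠ [] := by
            intro h; rw [h] at hcl; simp [contentLast] at hcl
          have hstep1 : run.foldl aStep acc = acc ++ [[]] := by
            rw [hruneq]
            simp only [List.foldl_cons, aStep_blank_contentLast acc l hc hcl]
            refine foldl_blank_run_blankLast _ _ ?_ (contentLast_append_sep acc) (by simp)
            intro x hx
            exact hrunb x (by rw [hruneq]; simp [hx])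
          calc (l :: rest).foldl aStep acc
              = (run ++ rest').foldl aStep acc := by rw [← hsplit]
            _ = rest'.foldl aStep (run.foldl aStep acc) := List.foldl_append
            _ = rest'.foldl aStep (acc ++ [[]]) := by rw [hstep1]
            _ = bGo (acc ++ [[]]) rest' := by
                  refine ih rest' hlt (acc ++ [[]]) ?_
                  rcases hrest'ok with h | ⟨l', t', heq, hcl'⟩
                  · exact Or.inr (Or.inr (Or.inl h))
                  · exact Or.inr (Or.inr (Or.inr ⟨l', t', heq, hcl'⟩))
            _ = bGo acc (l :: rest) := by
                  rw [hbgo]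
                  simp [List.isEmpty_iff, hne]
        · exact absurd habs (by simp)
        · injection heq with h1 h2
          subst h1
          exact absurd hcl' (by simp [hc])

-- ===== VERDICT (by name: the statement is the Claim_ definition above) =====
theorem remove_empty_lines_py_spec : Claim_equal_remove_empty_lines_py := by
  intro text _
  unfold Spec_remove_empty_lines_py remove_empty_lines_py remove_empty_lines_py_alt
  have := main_loop (PySem.Chars.splitOn text.toList ['\n']).length
    (PySem.Chars.splitOn text.toList ['\n']) le_rfl [] (Or.inl rfl)
  simp only [this]
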